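-- pv_equiv track=rewrite | github.com/Dub1n/SotE-Detailed-Item-Descriptions | scripts/build_aow/build_aow_stage3.py | build_step_layout
-- ===== SOURCE A (Python) =====
-- from typing import Dict, List, Tuple, NamedTuple
--
-- class StepLayout(NamedTuple):
--     max_step: int
--     has_fp1: bool
--     has_fp0: bool
--     has_charged: bool
--
-- def build_step_layout(rows: List[Dict[str, str]]) -> StepLayout:
--     max_step = 1
--     has_fp0 = False
--     has_fp1 = False
--     has_charged = False
--     for row in rows:
--         try:
--             step = int(str(row.get("Step", "") or "1"))
--         except ValueError:
--             step = 1
--         max_step = max(max_step, step)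
--         fp_val = 0 if str(row.get("FP", "")).strip() == "0" else 1
--         charged_val = 1 if str(row.get("Charged", "")).strip() == "1" else 0
--         has_fp0 = has_fp0 or fp_val == 0
--         has_fp1 = has_fp1 or fp_val == 1
--         has_charged = has_charged or charged_val == 1
--
--     return StepLayout(
--         max_step=max_step,
--         has_fp1=has_fp1,
--         has_fp0=has_fp0,
--         has_charged=has_charged,
--     )
-- ===== SOURCE B (Python) =====
-- # B: separate passes (parse helper + max over a comprehension + independent any() scans)
-- # instead of A's single fused accumulation loop.
-- from typing import Dict, List, Tuple, NamedTuple
--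
-- class StepLayout(NamedTuple):
--     max_step: int
--     has_fp1: bool
--     has_fp0: bool
--     has_charged: bool
--
-- def _parse_step(row):
--     try:
--         return int(str(row.get("Step", "") or "1"))
--     except ValueError:
--         return 1
--
-- def build_step_layout(rows: List[Dict[str, str]]) -> StepLayout:
--     max_step = max([1] + [_parse_step(r) for r in rows])
--     has_fp0 = any(str(r.get("FP", "")).strip() == "0" for r in rows)
--     has_fp1 = any(str(r.get("FP", "")).strip() != "0" for r in rows)
--     has_charged = any(str(r.get("Charged", "")).strip() == "1" for r in rows)
--     return StepLayout(max_step=max_step, has_fp1=has_fp1, has_fp0=has_fp0, has_charged=has_charged)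
-- ===== Notes on version B (the rewrite author's own statement) =====
-- stated objective: simpler
-- what changed: Replaces the single fused accumulation loop over four mutable flags with a parse helper, a max over a comprehension, and three independent any() scans.
import Mathlib
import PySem

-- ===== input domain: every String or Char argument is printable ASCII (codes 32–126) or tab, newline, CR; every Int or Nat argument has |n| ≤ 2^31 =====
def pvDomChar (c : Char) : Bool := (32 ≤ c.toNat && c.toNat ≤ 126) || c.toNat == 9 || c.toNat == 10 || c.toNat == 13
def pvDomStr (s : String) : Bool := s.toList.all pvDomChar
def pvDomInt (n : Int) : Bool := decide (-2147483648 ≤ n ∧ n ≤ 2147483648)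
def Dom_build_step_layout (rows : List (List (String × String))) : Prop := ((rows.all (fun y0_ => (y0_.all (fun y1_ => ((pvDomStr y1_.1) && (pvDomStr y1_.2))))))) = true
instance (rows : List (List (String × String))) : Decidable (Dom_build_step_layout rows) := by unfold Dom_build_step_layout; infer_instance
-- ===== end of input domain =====

-- B replaces A's single fused accumulation loop by a parse helper plus independent
-- max/any passes over the rows; objective: simpler.

-- ===== PORT A =====
-- fused loop over the four accumulator variables, exactly as the Python writes it
def build_step_layout (rows : List (List (String × String))) : Int × Bool × Bool × Bool :=
  let st := rows.foldl (fun (acc : Int × Bool × Bool × Bool) row =>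
    -- step = int(str(row.get("Step","") or "1")) with ValueError → 1
    let s := PySem.Dict.getD (PySem.Dict.mk row) "Step" ""
    let step := (PySem.Int.ofStr? (if s = "" then "1" else s)).getD 1
    let fp_val : Int :=
      if PySem.Str.strip (PySem.Dict.getD (PySem.Dict.mk row) "FP" "") = "0" then 0 else 1
    let charged_val : Int :=
      if PySem.Str.strip (PySem.Dict.getD (PySem.Dict.mk row) "Charged" "") = "1" then 1 else 0
    (max acc.1 step,
     acc.2.1 || decide (fp_val = 0),
     acc.2.2.1 || decide (fp_val = 1),
     acc.2.2.2 || decide (charged_val = 1)))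
    ((1 : Int), false, false, false)
  -- return StepLayout(max_step, has_fp1, has_fp0, has_charged); acc = (max_step, has_fp0, has_fp1, has_charged)
  (st.1, st.2.2.1, st.2.1, st.2.2.2)

-- ===== PORT B =====
def parse_step (row : List (String × String)) : Int :=
  let s := PySem.Dict.getD (PySem.Dict.mk row) "Step" ""
  (PySem.Int.ofStr? (if s = "" then "1" else s)).getD 1

def build_step_layout_alt (rows : List (List (String × String))) : Int × Bool × Bool × Bool :=
  -- max([1] + [_parse_step(r) for r in rows])
  let max_step := (rows.map parse_step).foldl max 1
  let has_fp0 := rows.any (fun r => PySem.Str.strip (PySem.Dict.getD (PySem.Dict.mk r) "FP" "") == "0")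
  let has_fp1 := rows.any (fun r => PySem.Str.strip (PySem.Dict.getD (PySem.Dict.mk r) "FP" "") != "0")
  let has_charged := rows.any (fun r => PySem.Str.strip (PySem.Dict.getD (PySem.Dict.mk r) "Charged" "") == "1")
  (max_step, has_fp1, has_fp0, has_charged)

-- ===== PRECONDITION & SPEC =====
def Spec_build_step_layout (rows : List (List (String × String))) (out : Int × Bool × Bool × Bool) : Prop := out = build_step_layout_alt rows
instance (rows : List (List (String × String))) (out : Int × Bool × Bool × Bool) : Decidable (Spec_build_step_layout rows out) := by unfold Spec_build_step_layout; infer_instance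

-- ===== CLAIM (what is proved, stated in full; the proofs are below) =====
def Claim_equal_build_step_layout : Prop := ∀ (rows : List (List (String × String))), Dom_build_step_layout rows → Spec_build_step_layout rows (build_step_layout rows)

-- ===== LEMMAS AND PROOFS =====

-- A's fused loop, started from an arbitrary state, computes B's four independent passes.
lemma build_loop_eq (rows : List (List (String × String))) (m : Int) (f0 f1 c : Bool) :
    rows.foldl (fun (acc : Int × Bool × Bool × Bool) row =>
      let s := PySem.Dict.getD (PySem.Dict.mk row) "Step" ""
      let step := (PySem.Int.ofStr? (if s = "" then "1" else s)).getD 1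
      let fp_val : Int :=
        if PySem.Str.strip (PySem.Dict.getD (PySem.Dict.mk row) "FP" "") = "0" then 0 else 1
      let charged_val : Int :=
        if PySem.Str.strip (PySem.Dict.getD (PySem.Dict.mk row) "Charged" "") = "1" then 1 else 0
      (max acc.1 step,
       acc.2.1 || decide (fp_val = 0),
       acc.2.2.1 || decide (fp_val = 1),
       acc.2.2.2 || decide (charged_val = 1))) (m, f0, f1, c)
    = ((rows.map parse_step).foldl max m,
       f0 || rows.any (fun r => PySem.Str.strip (PySem.Dict.getD (PySem.Dict.mk r) "FP" "") == "0"),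
       f1 || rows.any (fun r => PySem.Str.strip (PySem.Dict.getD (PySem.Dict.mk r) "FP" "") != "0"),
       c || rows.any (fun r => PySem.Str.strip (PySem.Dict.getD (PySem.Dict.mk r) "Charged" "") == "1")) := by
  induction rows generalizing m f0 f1 c with
  | nil => simp
  | cons r rs ih =>
    simp only [List.foldl_cons, List.map_cons, List.any_cons, ih, parse_step]
    by_cases h0 : PySem.Str.strip (PySem.Dict.getD (PySem.Dict.mk r) "FP" "") = "0" <;>
    by_cases h1 : PySem.Str.strip (PySem.Dict.getD (PySem.Dict.mk r) "Charged" "") = "1" <;>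
    simp [h0, h1, Bool.beq_eq_decide_eq, bne]

-- ===== VERDICT (by name: the statement is the Claim_ definition above) =====
theorem build_step_layout_spec : Claim_equal_build_step_layout := by
  intro rows _
  show _ = _
  simp only [build_step_layout, build_step_layout_alt, build_loop_eq, Bool.false_or]
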